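-- pv_equiv track=rewrite | github.com/yinyu-newbie/cs61a | hw03/parsons_probs/neighbor_digits.py | neighbor_digits
-- ===== SOURCE A (Python) =====
-- def neighbor_digits(num, prev_digit=-1):
--     """
--     Returns the number of digits in num that have the same digit to its right
--     or left.
--     >>> neighbor_digits(111)
--     3
--     >>> neighbor_digits(123)
--     0
--     >>> neighbor_digits(112)
--     2
--     >>> neighbor_digits(1122)
--     4
--     """
--     "*** YOUR CODE HERE ***"
--
--     if num < 10:
--         return 1 if num == prev_digit else 0
--
--     else:
--         rightmost_num = num % 10
--         num //= 10
--
--         if rightmost_num != prev_digit: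
--             if num % 10 == rightmost_num:  # update prev_digit with the same digit
--                 return 1 + neighbor_digits(num, rightmost_num)
--             else:                          # update prev_digit with lonely digit
--                 return neighbor_digits(num, rightmost_num)
--         else:                              # check digit same with prev_digit
--             return 1 + neighbor_digits(num, prev_digit)
-- ===== SOURCE B (Python) =====
-- def neighbor_digits(num, prev_digit=-1):
--     count = 0
--     while num >= 10:
--         r = num % 10
--         num //= 10
--         if r != prev_digit:
--             if num % 10 == r:
--                 count += 1
--             prev_digit = r
--         else:
--             count += 1
--     return count + (1 if num == prev_digit else 0)
-- ===== Notes on version B (the rewrite author's own statement) =====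
-- stated objective: alternative
-- what changed: Replaces A's non-tail recursion with an explicit while loop peeling digits into a count accumulator (constant stack instead of a recursion depth per digit).
import Mathlib
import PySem

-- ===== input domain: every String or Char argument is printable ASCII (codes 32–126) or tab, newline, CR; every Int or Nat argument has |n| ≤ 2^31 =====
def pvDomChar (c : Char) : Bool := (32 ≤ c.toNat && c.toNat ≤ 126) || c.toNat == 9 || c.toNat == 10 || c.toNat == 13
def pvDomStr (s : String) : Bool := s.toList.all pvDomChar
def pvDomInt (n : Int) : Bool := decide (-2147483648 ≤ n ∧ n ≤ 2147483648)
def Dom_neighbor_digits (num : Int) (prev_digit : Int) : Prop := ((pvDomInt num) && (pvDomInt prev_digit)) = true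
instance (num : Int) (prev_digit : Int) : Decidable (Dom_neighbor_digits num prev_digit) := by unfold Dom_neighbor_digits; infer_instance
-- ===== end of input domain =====

-- B replaces A's non-tail recursion with an explicit while loop accumulating a count; same digit arithmetic.

-- termination helper, cited by both ports' decreasing_by
theorem pv_fdiv_lt (num : Int) (h : ¬ num < 10) :
    (PySem.Int.floordiv num 10).toNat < num.toNat := by
  rw [PySem.Int.floordiv_eq_ediv_of_pos (by omega : (0:Int) < 10)]
  omega

-- ===== PORT A =====
def neighbor_digits (num : Int) (prev_digit : Int) : Int :=
  if h : num < 10 then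
    if num = prev_digit then 1 else 0
  else
    let rightmost_num := PySem.Int.mod num 10
    let num' := PySem.Int.floordiv num 10
    if rightmost_num ≠ prev_digit then
      if PySem.Int.mod num' 10 = rightmost_num then
        1 + neighbor_digits num' rightmost_num
      else
        neighbor_digits num' rightmost_num
    else
      1 + neighbor_digits num' prev_digit
termination_by num.toNat
decreasing_by all_goals exact pv_fdiv_lt num h

-- ===== PORT B =====
-- the while loop of Source B: state (num, prev_digit, count)
def neighborLoop (num : Int) (prev_digit : Int) (count : Int) : Int :=
  if h : num ≥ 10 then
    let r := PySem.Int.mod num 10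
    let num' := PySem.Int.floordiv num 10
    if r ≠ prev_digit then
      if PySem.Int.mod num' 10 = r then
        neighborLoop num' r (count + 1)
      else
        neighborLoop num' r count
    else
      neighborLoop num' prev_digit (count + 1)
  else
    count + (if num = prev_digit then 1 else 0)
termination_by num.toNat
decreasing_by all_goals exact pv_fdiv_lt num (by omega)

def neighbor_digits_alt (num : Int) (prev_digit : Int) : Int :=
  neighborLoop num prev_digit 0

-- ===== PRECONDITION & SPEC =====
def Spec_neighbor_digits (num : Int) (prev_digit : Int) (out : Int) : Prop := out = neighbor_digits_alt num prev_digit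
instance (num : Int) (prev_digit : Int) (out : Int) : Decidable (Spec_neighbor_digits num prev_digit out) := by unfold Spec_neighbor_digits; infer_instance

-- ===== CLAIM (what is proved, stated in full; the proofs are below) =====
def Claim_equal_neighbor_digits : Prop := ∀ (num : Int) (prev_digit : Int), Dom_neighbor_digits num prev_digit → Spec_neighbor_digits num prev_digit (neighbor_digits num prev_digit)

-- ===== LEMMAS AND PROOFS =====

-- loop invariant: the accumulator is additive over B's loop
theorem neighborLoop_eq (num prev_digit count : Int) :
    neighborLoop num prev_digit count = count + neighbor_digits num prev_digit := by
  rw [neighborLoop, neighbor_digits]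
  by_cases h : num ≥ 10
  · simp only [h, dite_true, show ¬ num < 10 by omega, dite_false]
    split_ifs <;> rw [neighborLoop_eq] <;> ring
  · simp only [h, dite_false, show num < 10 by omega, dite_true]
termination_by num.toNat
decreasing_by all_goals exact pv_fdiv_lt num (by omega)

-- ===== VERDICT (by name: the statement is the Claim_ definition above) =====
theorem neighbor_digits_spec : Claim_equal_neighbor_digits := by
  intro num prev_digit _
  unfold Spec_neighbor_digits neighbor_digits_alt
  rw [neighborLoop_eq]
  ring
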